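-- pv_equiv track=rewrite | github.com/xdanysx/Lumio | src/main.py | rubric_hits_details
-- ===== SOURCE A (Python) =====
-- from typing import Any, Dict, List, Optional, Tuple
--
-- def rubric_hits_details(rubric: List[List[str]], norm_text: str) -> Tuple[int, List[bool], List[Optional[str]]]:
--     hits: List[bool] = []
--     matched: List[Optional[str]] = []
--     for group in rubric:
--         found = None
--         for phrase in group:
--             if phrase in norm_text:
--                 found = phrase
--                 break
--         ok = found is not None
--         hits.append(ok)
--         matched.append(found)
--     return sum(hits), hits, matched
-- ===== SOURCE B (Python) =====
-- from typing import List, Optional, Tuple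
--
-- def rubric_hits_details(rubric: List[List[str]], norm_text: str) -> Tuple[int, List[bool], List[Optional[str]]]:
--     # Test each distinct phrase against the text once, then answer groups by set lookup.
--     distinct = set()
--     for group in rubric:
--         distinct.update(group)
--     present = {p for p in distinct if p in norm_text}
--     matched = [next((p for p in group if p in present), None) for group in rubric]
--     hits = [m is not None for m in matched]
--     return len(matched) - matched.count(None), hits, matched
-- ===== Notes on version B (the rewrite author's own statement) =====
-- stated objective: alternative
-- what changed: B deduplicates all phrases into a set, runs each distinct phrase's substring test against the text once up front, then answers every group by a first-match set lookup, deriving hits and the count from the matched list; A interleaves the substring tests in a two-accumulator loop that stops at the first hit of each group, so A can skip tests B performs (and B skips duplicate tests A repeats).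
import Mathlib
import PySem

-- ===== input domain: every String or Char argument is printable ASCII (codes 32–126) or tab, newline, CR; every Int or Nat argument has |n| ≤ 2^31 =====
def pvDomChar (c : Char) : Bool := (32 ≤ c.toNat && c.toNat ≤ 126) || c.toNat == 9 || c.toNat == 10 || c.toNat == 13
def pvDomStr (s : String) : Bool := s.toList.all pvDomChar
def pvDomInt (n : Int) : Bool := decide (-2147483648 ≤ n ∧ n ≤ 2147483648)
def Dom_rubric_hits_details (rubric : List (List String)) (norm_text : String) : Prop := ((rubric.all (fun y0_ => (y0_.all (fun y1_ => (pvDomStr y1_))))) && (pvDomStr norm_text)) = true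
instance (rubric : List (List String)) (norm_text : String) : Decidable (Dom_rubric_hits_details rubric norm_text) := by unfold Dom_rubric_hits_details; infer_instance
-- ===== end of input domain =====

-- B replaces A's per-group short-circuit scan with one up-front substring test per distinct phrase and set lookups per group (objective: alternative; equal return values proved below).
-- ===== PORT A =====
def rubric_hits_details (rubric : List (List String)) (norm_text : String) : Int × List Bool × List (Option String) :=
  let acc := rubric.foldl
    (fun (acc : List Bool × List (Option String)) group =>
      let found := group.find? (fun phrase => PySem.Str.isIn phrase norm_text)
      (acc.1 ++ [found.isSome], acc.2 ++ [found]))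
    ([], [])
  (acc.1.foldl (fun a b => a + (if b then 1 else 0)) 0, acc.1, acc.2)

-- ===== PORT B =====
-- B: one substring test per DISTINCT phrase, then per-group first match by set lookup.
def rubric_hits_details_alt (rubric : List (List String)) (norm_text : String) : Int × List Bool × List (Option String) :=
  let distinct := rubric.foldl PySem.Set.update PySem.Set.empty
  let present := distinct.filter (fun p => PySem.Str.isIn p norm_text)
  let matched := rubric.map (fun group => group.find? (fun p => present.contains p))
  let hits := matched.map Option.isSome
  ((matched.length : Int) - matched.count none, hits, matched)

-- ===== PRECONDITION & SPEC =====
def Spec_rubric_hits_details (rubric : List (List String)) (norm_text : String) (out : Int × List Bool × List (Option String)) : Prop := out = rubric_hits_details_alt rubric norm_text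
instance (rubric : List (List String)) (norm_text : String) (out : Int × List Bool × List (Option String)) : Decidable (Spec_rubric_hits_details rubric norm_text out) := by unfold Spec_rubric_hits_details; infer_instance

-- ===== CLAIM (what is proved, stated in full; the proofs are below) =====
def Claim_equal_rubric_hits_details : Prop := ∀ (rubric : List (List String)) (norm_text : String), Dom_rubric_hits_details rubric norm_text → Spec_rubric_hits_details rubric norm_text (rubric_hits_details rubric norm_text)

-- ===== LEMMAS AND PROOFS =====

theorem pv_mem_foldl_update {α : Type} [DecidableEq α] (l : List (List α)) (s : PySem.Set α) (p : α) :
    p ∈ l.foldl PySem.Set.update s ↔ p ∈ s ∨ ∃ g ∈ l, p ∈ g := by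
  induction l generalizing s with
  | nil => simp
  | cons g t ih =>
    simp only [List.foldl_cons, ih, PySem.Set.mem_update, List.mem_cons]
    constructor
    · rintro ((h | h) | ⟨g', hg', hp⟩)
      · exact Or.inl h
      · exact Or.inr ⟨g, Or.inl rfl, h⟩
      · exact Or.inr ⟨g', Or.inr hg', hp⟩
    · rintro (h | ⟨g', (rfl | hg'), hp⟩)
      · exact Or.inl (Or.inl h)
      · exact Or.inl (Or.inr hp)
      · exact Or.inr ⟨g', hg', hp⟩

theorem pv_find?_congr {α : Type} (l : List α) (f g : α → Bool)
    (h : ∀ x ∈ l, f x = g x) : l.find? f = l.find? g := by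
  induction l with
  | nil => rfl
  | cons x t ih =>
    simp only [List.find?_cons, h x (List.mem_cons_self)]
    split <;> [rfl; exact ih (fun y hy => h y (List.mem_cons_of_mem _ hy))]

theorem pv_foldl_pair (rubric : List (List String)) (norm_text : String)
    (h : List Bool) (m : List (Option String)) :
    rubric.foldl
      (fun (acc : List Bool × List (Option String)) group =>
        let found := group.find? (fun phrase => PySem.Str.isIn phrase norm_text)
        (acc.1 ++ [found.isSome], acc.2 ++ [found]))
      (h, m)
    = (h ++ rubric.map (fun g => (g.find? (fun phrase => PySem.Str.isIn phrase norm_text)).isSome),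
       m ++ rubric.map (fun g => g.find? (fun phrase => PySem.Str.isIn phrase norm_text))) := by
  induction rubric generalizing h m with
  | nil => simp
  | cons g t ih =>
    rw [List.foldl_cons, ih]
    simp

theorem pv_sum_bools (l : List Bool) :
    l.foldl (fun a b => a + (if b then 1 else 0)) (0 : Int) = (l.countP id : Int) := by
  have : ∀ (a : Int), l.foldl (fun a b => a + (if b then 1 else 0)) a = a + (l.countP id : Int) := by
    induction l with
    | nil => simp
    | cons x t ih =>
      intro a
      simp only [List.foldl_cons, ih, List.countP_cons, id]
      split <;> omega
  simpa using this 0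

theorem pv_count_none (m : List (Option String)) :
    ((m.map Option.isSome).countP id : Int) = (m.length : Int) - (m.count none : Int) := by
  induction m with
  | nil => simp
  | cons x t ih =>
    simp only [List.map_cons, List.countP_cons, List.count_cons, List.length_cons]
    cases x <;> simp_all <;> omega

-- ===== VERDICT (by name: the statement is the Claim_ definition above) =====
theorem rubric_hits_details_spec : Claim_equal_rubric_hits_details := by
  intro rubric norm_text _
  unfold Spec_rubric_hits_details rubric_hits_details rubric_hits_details_alt
  simp only [pv_foldl_pair, List.nil_append]
  have hmap : rubric.map (fun group => group.find? (fun p =>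
      ((rubric.foldl PySem.Set.update PySem.Set.empty).filter
        (fun p => PySem.Str.isIn p norm_text)).contains p))
      = rubric.map (fun g => g.find? (fun phrase => PySem.Str.isIn phrase norm_text)) := by
    refine List.map_congr_left (fun g hg => ?_)
    refine (pv_find?_congr _ _ _ (fun p hp => ?_))
    have hd : p ∈ rubric.foldl PySem.Set.update PySem.Set.empty :=
      (pv_mem_foldl_update rubric _ p).2 (Or.inr ⟨g, hg, hp⟩)
    show (List.filter _ _).contains p = PySem.Str.isIn p norm_text
    simp only [List.contains_eq_mem, List.mem_filter]
    have hd' : p ∈ List.foldl PySem.Set.update ([] : List String) rubric := hd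
    simp [hd']
  rw [hmap]
  refine Prod.ext ?_ (Prod.ext ?_ rfl)
  · show _ = (((rubric.map _).length : Int) - _)
    rw [pv_sum_bools]
    have := pv_count_none (rubric.map (fun g => g.find? (fun phrase => PySem.Str.isIn phrase norm_text)))
    simp only [List.map_map] at this ⊢
    simpa using this
  · simp [List.map_map]
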